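-- pv_equiv track=rewrite | github.com/bharathmrr/Slackbot-Content-Pipeline- | app/keyword/processor.py | _extract_keyword_from_row
-- ===== SOURCE A (Python) =====
-- from typing import List, Set
--
-- def _extract_keyword_from_row(row: List[str]) -> str:
--     """Extract keyword from CSV row."""
--     if not row:
--         return ""
--
--     # If only one column, use it
--     if len(row) == 1:
--         return row[0].strip()
--
--     # Look for the most likely keyword column
--     for cell in row:
--         cell = cell.strip()
--         if cell and len(cell) > 1 and not cell.isdigit():
--             return cell
--
--     # Fallback to first non-empty cell
--     for cell in row:
--         if cell.strip():
--             return cell.strip()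
--
--     return ""
-- ===== SOURCE B (Python) =====
-- from typing import List
--
-- def _extract_keyword_from_row(row: List[str]) -> str:
--     """Extract keyword from CSV row (single-pass with fallback accumulator)."""
--     if not row:
--         return ""
--     if len(row) == 1:
--         return row[0].strip()
--     fallback = None
--     for cell in row:
--         s = cell.strip()
--         if s and len(s) > 1 and not s.isdigit():
--             return s
--         if fallback is None and s:
--             fallback = s
--     return fallback if fallback is not None else ""
-- ===== Notes on version B (the rewrite author's own statement) =====
-- stated objective: simpler
-- what changed: A's two sequential scans (keyword scan, then a second fallback scan re-stripping every cell) are merged into a single pass that threads a fallback accumulator, so each cell is stripped exactly once.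
import Mathlib
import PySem

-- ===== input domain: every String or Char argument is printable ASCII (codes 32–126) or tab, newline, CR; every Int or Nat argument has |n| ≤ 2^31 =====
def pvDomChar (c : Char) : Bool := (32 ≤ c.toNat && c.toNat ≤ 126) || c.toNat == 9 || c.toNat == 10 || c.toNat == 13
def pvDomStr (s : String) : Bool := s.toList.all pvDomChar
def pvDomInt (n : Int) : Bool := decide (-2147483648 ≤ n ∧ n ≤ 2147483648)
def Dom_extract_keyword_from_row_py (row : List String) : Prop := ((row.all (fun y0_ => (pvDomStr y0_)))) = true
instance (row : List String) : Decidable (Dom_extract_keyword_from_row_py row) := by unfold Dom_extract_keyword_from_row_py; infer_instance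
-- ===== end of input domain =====

-- B merges A's two sequential scans into a single pass threading a fallback accumulator (objective: simpler).

-- ===== PORT A =====
-- first loop: return the first stripped cell that is non-empty, longer than 1 and not all digits
def pvA_scan1 : List String → Option String
  | [] => none
  | cell :: rest =>
      let cell := PySem.Str.strip cell
      if cell ≠ "" && decide (1 < PySem.Str.len cell) && !(PySem.Str.strIsdigit cell) then some cell
      else pvA_scan1 rest

-- second loop: fallback to first non-empty (stripped) cell
def pvA_scan2 : List String → String
  | [] => ""
  | cell :: rest =>
      if PySem.Str.strip cell ≠ "" then PySem.Str.strip cell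
      else pvA_scan2 rest

def extract_keyword_from_row_py (row : List String) : String :=
  match row with
  | [] => ""
  | [x] => PySem.Str.strip x
  | _ =>
      match pvA_scan1 row with
      | some s => s
      | none => pvA_scan2 row

-- ===== PORT B =====
-- single pass: return a keyword cell immediately, otherwise remember the first non-empty strip as fallback
def pvB_loop (fallback : Option String) : List String → String
  | [] => fallback.getD ""
  | cell :: rest =>
      let s := PySem.Str.strip cell
      if s ≠ "" && decide (1 < PySem.Str.len s) && !(PySem.Str.strIsdigit s) then s
      else pvB_loop (if fallback.isNone && s ≠ "" then some s else fallback) rest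

def extract_keyword_from_row_py_alt (row : List String) : String :=
  if row.isEmpty then ""
  else if row.length = 1 then PySem.Str.strip (row.headD "")  -- row[0] on a known-nonempty row
  else pvB_loop none row

-- ===== PRECONDITION & SPEC =====
def Spec_extract_keyword_from_row_py (row : List String) (out : String) : Prop := out = extract_keyword_from_row_py_alt row
instance (row : List String) (out : String) : Decidable (Spec_extract_keyword_from_row_py row out) := by unfold Spec_extract_keyword_from_row_py; infer_instance

-- ===== CLAIM (what is proved, stated in full; the proofs are below) =====
def Claim_equal_extract_keyword_from_row_py : Prop := ∀ (row : List String), Dom_extract_keyword_from_row_py row → Spec_extract_keyword_from_row_py row (extract_keyword_from_row_py row)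

-- ===== LEMMAS AND PROOFS =====

-- B's single pass computes: the first scan's hit if any, else the threaded fallback, else A's second scan
theorem pvB_loop_eq (row : List String) : ∀ fb : Option String,
    pvB_loop fb row =
      match pvA_scan1 row with
      | some s => s
      | none => match fb with
                | some f => f
                | none => pvA_scan2 row := by
  induction row with
  | nil => intro fb; cases fb <;> simp [pvB_loop, pvA_scan1, pvA_scan2, Option.getD]
  | cons cell rest ih =>
      intro fb
      cases fb with
      | some f =>
          simp only [pvB_loop, pvA_scan1, ih]
          split_ifs <;> simp_all
      | none =>
          simp only [pvB_loop, pvA_scan1, pvA_scan2, ih]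
          split_ifs <;> simp_all

-- ===== VERDICT (by name: the statement is the Claim_ definition above) =====
theorem extract_keyword_from_row_py_spec : Claim_equal_extract_keyword_from_row_py := by
  intro row _
  unfold Spec_extract_keyword_from_row_py
  match row with
  | [] => simp [extract_keyword_from_row_py, extract_keyword_from_row_py_alt]
  | [x] => simp [extract_keyword_from_row_py, extract_keyword_from_row_py_alt]
  | a :: b :: rest =>
      simp [extract_keyword_from_row_py, extract_keyword_from_row_py_alt, pvB_loop_eq]
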